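-- pv_equiv track=rewrite | github.com/dioliveira07/second-brain-hub | app/services/reflection.py | _infer_impact_areas
-- ===== SOURCE A (Python) =====
-- def _infer_impact_areas(changed_files: list[str]) -> list[str]:
--     areas = set()
--     for f in changed_files:
--         fl = f.lower()
--         if any(x in fl for x in ("auth", "login", "token", "oauth", "jwt")):
--             areas.add("auth")
--         if any(x in fl for x in ("model", "schema", "migration", "db/", "database")):
--             areas.add("database")
--         if any(x in fl for x in ("route", "api/", "endpoint", "controller")):
--             areas.add("api")
--         if any(x in fl for x in ("docker", "compose", "deploy", "infra", "k8s", "terraform")):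
--             areas.add("infra")
--         if any(x in fl for x in ("test", "spec", "__test__")):
--             areas.add("tests")
--         if any(x in fl for x in ("readme", "docs/", ".md")):
--             areas.add("docs")
--     return list(areas) if areas else ["general"]
-- ===== SOURCE B (Python) =====
-- _AREA_KEYWORDS = [
--     ("auth", ("auth", "login", "token", "oauth", "jwt")),
--     ("database", ("model", "schema", "migration", "db/", "database")),
--     ("api", ("route", "api/", "endpoint", "controller")),
--     ("infra", ("docker", "compose", "deploy", "infra", "k8s", "terraform")),
--     ("tests", ("test", "spec", "__test__")),
--     ("docs", ("readme", "docs/", ".md")),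
-- ]
--
--
-- def _file_areas(f):
--     fl = f.lower()
--     return {area for area, kws in _AREA_KEYWORDS if any(k in fl for k in kws)}
--
--
-- def _go(files):
--     if len(files) <= 1:
--         return _file_areas(files[0]) if files else set()
--     mid = len(files) // 2
--     return _go(files[:mid]) | _go(files[mid:])
--
--
-- def _infer_impact_areas(changed_files: list[str]) -> list[str]:
--     areas = _go(changed_files)
--     return list(areas) if areas else ["general"]
-- ===== Notes on version B (the rewrite author's own statement) =====
-- stated objective: alternative
-- what changed: Replaces A's single forward pass that mutates one shared set via six hard-coded if/any branches with a divide-and-conquer: the file list is split in halves, each half's area set is computed recursively (per-file sets read off a (area, keywords) table), and the halves are combined by set union.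
import Mathlib
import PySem

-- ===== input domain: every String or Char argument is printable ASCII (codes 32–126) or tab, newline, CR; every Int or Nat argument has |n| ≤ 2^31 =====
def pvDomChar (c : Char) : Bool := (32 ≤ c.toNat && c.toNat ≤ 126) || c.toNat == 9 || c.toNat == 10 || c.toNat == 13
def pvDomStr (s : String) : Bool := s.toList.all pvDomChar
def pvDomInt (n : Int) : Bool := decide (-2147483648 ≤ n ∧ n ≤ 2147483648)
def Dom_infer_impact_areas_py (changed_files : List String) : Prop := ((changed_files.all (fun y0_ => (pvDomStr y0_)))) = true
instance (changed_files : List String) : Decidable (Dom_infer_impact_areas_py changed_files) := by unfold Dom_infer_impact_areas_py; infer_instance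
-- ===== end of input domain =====

-- B replaces A's single forward pass over one shared set by a divide-and-conquer: split the
-- list in halves, compute each half's area set recursively from a (area, keywords) table, and
-- union the halves (objective: alternative; proved: both ports build the same set, in the same
-- first-insertion order — Python's 'list(set)' hash iteration order itself is compared as a set).

-- ===== PORT A =====
-- one iteration of A's 'for f in changed_files' loop body
def inferAreasStepA (areas : PySem.Set String) (f : String) : PySem.Set String :=
  let fl := PySem.Str.lower f
  let areas := if (["auth", "login", "token", "oauth", "jwt"].any (fun x => PySem.Str.isIn x fl)) then PySem.Set.add areas "auth" else areas
  let areas := if (["model", "schema", "migration", "db/", "database"].any (fun x => PySem.Str.isIn x fl)) then PySem.Set.add areas "database" else areas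
  let areas := if (["route", "api/", "endpoint", "controller"].any (fun x => PySem.Str.isIn x fl)) then PySem.Set.add areas "api" else areas
  let areas := if (["docker", "compose", "deploy", "infra", "k8s", "terraform"].any (fun x => PySem.Str.isIn x fl)) then PySem.Set.add areas "infra" else areas
  let areas := if (["test", "spec", "__test__"].any (fun x => PySem.Str.isIn x fl)) then PySem.Set.add areas "tests" else areas
  let areas := if (["readme", "docs/", ".md"].any (fun x => PySem.Str.isIn x fl)) then PySem.Set.add areas "docs" else areas
  areas

def infer_impact_areas_py (changed_files : List String) : List String :=
  let areas : PySem.Set String := changed_files.foldl inferAreasStepA PySem.Set.empty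
  if areas = [] then ["general"] else areas

-- ===== PORT B =====
-- Source B's _AREA_KEYWORDS table
def pvAreaTable : List (String × List String) :=
  [("auth", ["auth", "login", "token", "oauth", "jwt"]),
   ("database", ["model", "schema", "migration", "db/", "database"]),
   ("api", ["route", "api/", "endpoint", "controller"]),
   ("infra", ["docker", "compose", "deploy", "infra", "k8s", "terraform"]),
   ("tests", ["test", "spec", "__test__"]),
   ("docs", ["readme", "docs/", ".md"])]

-- the generator of Source B's set comprehension: the matching area labels of one file, in table order
def pvBlock (f : String) : List String :=
  pvAreaTable.filterMap (fun p => if p.2.any (fun k => PySem.Str.isIn k (PySem.Str.lower f)) then some p.1 else none)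

-- Source B's _file_areas: the set comprehension = the set of the generated labels
def pvFileAreas (f : String) : PySem.Set String := PySem.Set.ofList (pvBlock f)

-- Source B's _go: divide and conquer, '|' = PySem.Set.union; len(files)//2 = Nat division (exact here)
def pvGo (files : List String) : PySem.Set String :=
  if h : files.length ≤ 1 then
    match files with
    | [] => PySem.Set.empty
    | f :: _ => pvFileAreas f
  else
    PySem.Set.union (pvGo (files.take (files.length / 2))) (pvGo (files.drop (files.length / 2)))
termination_by files.length
decreasing_by
  · simp only [List.length_take]; omega
  · simp only [List.length_drop]; omega

def infer_impact_areas_py_alt (changed_files : List String) : List String :=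
  let areas : PySem.Set String := pvGo changed_files
  if areas = [] then ["general"] else areas

-- ===== PRECONDITION & SPEC =====
def Spec_infer_impact_areas_py (changed_files : List String) (out : List String) : Prop := out = infer_impact_areas_py_alt changed_files
instance (changed_files : List String) (out : List String) : Decidable (Spec_infer_impact_areas_py changed_files out) := by unfold Spec_infer_impact_areas_py; infer_instance

-- ===== CLAIM (what is proved, stated in full; the proofs are below) =====
def Claim_equal_infer_impact_areas_py : Prop := ∀ (changed_files : List String), Dom_infer_impact_areas_py changed_files → Spec_infer_impact_areas_py changed_files (infer_impact_areas_py changed_files)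

-- ===== LEMMAS AND PROOFS =====

-- A's six-branch loop body = inserting the file's table-order label block into the set
theorem step_eq (s : PySem.Set String) (f : String) :
    inferAreasStepA s f = PySem.Set.update s (pvBlock f) := by
  unfold inferAreasStepA pvBlock pvAreaTable
  simp only [List.filterMap_cons, List.filterMap_nil]
  split_ifs <;> rfl

-- inserting a list with one element's duplicates discarded = inserting the list, once that element is present
theorem update_discard (M : List String) : ∀ (t : PySem.Set String) (x : String), x ∈ t →
    PySem.Set.update t (PySem.Set.discard M x) = PySem.Set.update t M := by
  induction M with
  | nil => intro t x _; rfl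
  | cons y M ih =>
    intro t x hx
    by_cases hyx : (y == x) = true
    · have : PySem.Set.discard (y :: M) x = PySem.Set.discard M x := by
        simp [PySem.Set.discard, hyx]
      rw [this, ih t x hx, PySem.Set.update_cons,
        PySem.Set.add_of_mem (by rwa [eq_of_beq hyx])]
    · have : PySem.Set.discard (y :: M) x = y :: PySem.Set.discard M x := by
        simp [PySem.Set.discard, hyx]
      rw [this, PySem.Set.update_cons, PySem.Set.update_cons,
        ih (PySem.Set.add t y) x ((PySem.Set.mem_add t y x).mpr (Or.inl hx))]

-- inserting set(b) = inserting b (duplicates are no-ops)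
theorem update_ofList (b : List String) : ∀ (s : PySem.Set String),
    PySem.Set.update s (PySem.Set.ofList b) = PySem.Set.update s b := by
  induction b with
  | nil => intro s; rfl
  | cons x b ih =>
    intro s
    rw [PySem.Set.ofList_cons, PySem.Set.update_cons,
      update_discard (PySem.Set.ofList b) (PySem.Set.add s x) x
        ((PySem.Set.mem_add s x x).mpr (Or.inr rfl)),
      ih (PySem.Set.add s x), ← PySem.Set.update_cons]

-- set union of the two halves' sets = the set of the concatenation
theorem union_ofList (a b : List String) :
    PySem.Set.union (PySem.Set.ofList a) (PySem.Set.ofList b) = PySem.Set.ofList (a ++ b) := by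
  show PySem.Set.update (PySem.Set.ofList a) (PySem.Set.ofList b) = _
  rw [update_ofList, ← PySem.Set.ofList_append]

-- B's divide and conquer builds the set of all label blocks in file order
theorem go_eq (files : List String) :
    pvGo files = PySem.Set.ofList (files.flatMap pvBlock) := by
  induction files using pvGo.induct with
  | case1 _ _ => simp [pvGo]
  | case2 f rest h _ =>
    have : rest = [] := by
      cases rest with
      | nil => rfl
      | cons a l => simp at h
    subst this
    simp [pvGo, pvFileAreas]
  | case3 files h ih1 ih2 =>
    rw [pvGo]
    simp only [dif_neg h]
    rw [ih1, ih2, union_ofList, ← List.flatMap_append, List.take_append_drop]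

-- A's fold builds the same set
theorem a_eq (files : List String) :
    files.foldl inferAreasStepA PySem.Set.empty = PySem.Set.ofList (files.flatMap pvBlock) := by
  have h1 : files.foldl inferAreasStepA PySem.Set.empty
      = files.foldl (fun acc x => (pvBlock x).foldl PySem.Set.add acc) PySem.Set.empty := by
    have : inferAreasStepA = fun acc x => (pvBlock x).foldl PySem.Set.add acc :=
      funext fun s => funext fun f => step_eq s f
    rw [this]
  rw [h1, ← List.foldl_flatMap]
  rfl

-- ===== VERDICT (by name: the statement is the Claim_ definition above) =====
theorem infer_impact_areas_py_spec : Claim_equal_infer_impact_areas_py := by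
  intro changed_files _
  unfold Spec_infer_impact_areas_py infer_impact_areas_py infer_impact_areas_py_alt
  rw [a_eq, go_eq]
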